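-- pv_equiv track=rewrite | github.com/bgorlick/colorcat | colorcat.py | c_new_furball
-- ===== SOURCE A (Python) =====
-- import itertools
--
-- colorcat_furballs = [
-- "            .';::::::::::::::::::::::::::::::::::::::::::::::::::;,..           ","         .:dOKKKXXXXXXXXXXXXXXXXXXXXXXXXXXXXXXXXXXXXXXXXXXXXXXXXXKKOxc'         ","       .ck0KXXNNNNNNXXNNNNNNNNNNNNNNNNNNNNNNNNNNNNNNNNNNNNXKNNNNNNNXXKOo'       ","      'd0KXXNNNNNWKc,;;cd0NWWWWWWWWWWWWWWWWWWWWWWWWWWWXkl;;;;kWNNNNNNXXKk;      ","     .d0KXXNNNNWWWo.:x,.'.:kNMMMMMMMMMMMMMMMMMMMMMMWOl..''od.;XWWNNNNXXXKk,     ","     ;kKXXXNNWWWMWc ;x;'l' .;xXMMMMMMMMMMMMMMMMMMWO:. .c;.do ,KMMWWNNXXXK0l.    ","     ;kKXXXNNWMMMWc :x;';l:;;.;kWWX0OkkxxxkO0KNW0c.,;;cc',do.'0MMMWNNXXKK0l.    ","     ;kKXXXNNWMMMWl ,d;cl;;c:;,.,,.'........'.',..;:c:;cl;lc ;XMMMWNNXXXK0l.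    ","     ;kKXXXNNWMMMMk..l:';c'c;;c'c;.co;cc,c:lo.'l,::,c,;c';l,.lWMMMWNNXXXK0l.    ","     ;kKXXXNNWMMMMNc ;d:.ccc;;c,x:'ldclc;clld,,x:::;ccl';dc.'0MMMMWNNXXXK0l.    ","     ;kKXXXNNWMMMMM0,.locc'l,:c.;l';c.cl,c,:l'c:.;c'l;:llo'.xWMMMMWNNXXXK0l.    ","     ;kKXXXNNWMMMMMWo.ccloc;.'::.:c;:.cc,c,;ccc.,c,.'colcl';XMMMMMWNNXXXKOl.    ","     ;kKXXXNNWMMMMWk..:ccol,lo.:;::;:.cc,c,;cc:,c'cd,:dccc'.lNMMMMWNNXXXKOl.    ","     ;kKXXXNNWMMMMK,.::,co;.;:...,,,;,c;.c:;;;,.. ,c.'ll,;c'.xMMMMWNNXXXKOl.    ","     ;kKXXXNNWMMMMd.,' 'lo:''.   '..:ol. :dc'..   .,,;lo;..;.;XMMMWNNXXXKOl.    ","     ;kKXXXNNWMMMWc.;c,ox; ;o.  .oo.:o,...ll.,c   .dx..dx;;c.'0MMMWNNXXXKOl.    ","     ;kKXXXNNWMMMWl.::.cxdc;lc'.,oc..:c'';l'.,oc'.;lc;oxo',c.,KMMMWNNXXXKOl.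    ","     ;kKXXNNNWMMMMx.':,,;;coccc:c'.,:,cc,c;;:..:c:cllc;;,,:;.lWMMMWNNXXXK0l.    ","     ;kKXXXNNWMMMMNl.,c,.;oxko:::c;';;cl;c:;,,::::cxxdc..c:.;KMMMMWNNXXXK0l.    ","     ;kKXXXNNWMMMMMXl',:::c::::cld0O,.:olc..d0xlc::::cc::;':0MMMMMWNNXXXKOl.    ","     ;kKXXXNNWMMMMMMWx..col:,:lclkWWO:....,xNM0ocl:,:cll..lNMMMMMMWNNXXXKOl.    ","     ;kKXXXNNWMMMMMMM0,;xl;;;;;:okXMMNo. ;XMMW0dc;;;;,cxc'xMMMMMMMWNNXXXKOl.    ","     ;kKXXXNNWMMMMMMWx..lc.;,'c:,,:colcclclol:;':l,';';o' cNMMMMMMWNNXXXKOl.    ","     ;OKXXXNNWMMMMMM0'':okclccc;';;.:x0NNXkl.,:';:cclcxdc'.dWMMMMMWNNXXXKOl.    ","     ;OKXXXNNWMMMMMK;.,,,ccccc,;'.:;'.,;,;..,c'.;,clccl;,,..kWMMMMWNNXXXK0l.    ","     ;kKXXXNNWMMMMNc.''';:cod'.cl..cl;:c,:;:l'.:l..ldcc:,''.,0MMMMWNNXXXX0l.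    ","     ;kKXXXNNWMMMMk.'oc::;:l;':o::::l::c,::cc:c:lc',c:;::co;.lWMMMWNNXXXK0l.    ","     ;kKXXXNNWMMMWc :ko:dk:.'c:;.:l;;;l;.cc,;cl.':c: 'xkccko.,KMMMWNNXXXKOl.    ","     ;OKXXXNNWMMMWc :l.,kd'.clcxcl:.;c:;,;cc.,lcdocl'.ckc.cl.'0MMMWNNXXXKOl.    ","     ;kKXXXNNWMMMMd';'.;;'''cc;d;c;.l,;ddc'l;'l;oc;l,'',;,.;'cNMMMWNNXXXK0l.    ","     ;kKXXXNNWMMMMXl.'ko:;ccc:...:l.:c'',':c':l...,lcc:;lk:.;0MMMMWNNXXXK0l.    ","     ;kKXXXNNWWMMMMNo.;,;ccdoo,;d:''.:l;'cc'.';oc,codlc:,:':KMMMMMWNNXXXK0l.    ","     ,xKXXXNNWWWMMMMW0l..':oco,.';':dclc;clol',,..lllc,..:kNMMMMMWWNNXXXKOc.    ","     .lOKXXNNNNWWWMMMMWKxc;..,...::...cc,c,..;c.. ''.,:o0WMMMMWWWNNNNXXKKx'     ","      .lOKXXNNNNNNNNNNNNNNXOxl:;','....'......,',:cokKNNNNNNNNNNNNNNNXK0d'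      ","        ,dOKXXXXXNNNXXNNNNNNNNNNK0OkxdddddddxkOKXNNNNNNNNNNNNNNNNNXXK0x:.       ","         .,cdk00KKKKKKKKKKKKKKKKKKKKKKKKKKKKKKKKKKKKKKKKKKK000KKK0Oxl;.         ","             ..'''''''''''''''''''''''''''''''''''''''''''''''''''.             ","             Colorcat by Ben Gorlick (github: bgorlick) (c) 2024 | MIT     \n",
-- ]
--
-- def c_new_furball(input_text):
--     let_to_p = ["k", "K", "0", "X", "N", "W", "M", "c", "d", "l", "x", "o", "O"]
--     rep_chars = [char for char in input_text if char.isalnum()]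
--     if len(rep_chars) < 10:
--         return colorcat_furballs
--     new_furball = list(colorcat_furballs)
--     rep_i = itertools.cycle(rep_chars)
--     for i, line in enumerate(new_furball[:-1]):
--         new_line = ""
--         for char in line:
--             if char in let_to_p:
--                 new_line += next(rep_i)
--             else:
--                 new_line += char
--         new_furball[i] = new_line
--     new_furball.append("\n      Look carefully at the furball you just created... meow it contains your input :)")
--     return new_furball
-- ===== SOURCE B (Python) =====
-- import itertools
-- import re
--
-- colorcat_furballs = [
-- "            .';::::::::::::::::::::::::::::::::::::::::::::::::::;,..           ",
-- "         .:dOKKKXXXXXXXXXXXXXXXXXXXXXXXXXXXXXXXXXXXXXXXXXXXXXXXXXKKOxc'         ",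
-- "       .ck0KXXNNNNNNXXNNNNNNNNNNNNNNNNNNNNNNNNNNNNNNNNNNNNXKNNNNNNNXXKOo'       ",
-- "      'd0KXXNNNNNWKc,;;cd0NWWWWWWWWWWWWWWWWWWWWWWWWWWWXkl;;;;kWNNNNNNXXKk;      ",
-- "     .d0KXXNNNNWWWo.:x,.'.:kNMMMMMMMMMMMMMMMMMMMMMMWOl..''od.;XWWNNNNXXXKk,     ",
-- "     ;kKXXXNNWWWMWc ;x;'l' .;xXMMMMMMMMMMMMMMMMMMWO:. .c;.do ,KMMWWNNXXXK0l.    ",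
-- "     ;kKXXXNNWMMMWc :x;';l:;;.;kWWX0OkkxxxkO0KNW0c.,;;cc',do.'0MMMWNNXXKK0l.    ",
-- "     ;kKXXXNNWMMMWl ,d;cl;;c:;,.,,.'........'.',..;:c:;cl;lc ;XMMMWNNXXXK0l.    ",
-- "     ;kKXXXNNWMMMMk..l:';c'c;;c'c;.co;cc,c:lo.'l,::,c,;c';l,.lWMMMWNNXXXK0l.    ",
-- "     ;kKXXXNNWMMMMNc ;d:.ccc;;c,x:'ldclc;clld,,x:::;ccl';dc.'0MMMMWNNXXXK0l.    ",
-- "     ;kKXXXNNWMMMMM0,.locc'l,:c.;l';c.cl,c,:l'c:.;c'l;:llo'.xWMMMMWNNXXXK0l.    ",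
-- "     ;kKXXXNNWMMMMMWo.ccloc;.'::.:c;:.cc,c,;ccc.,c,.'colcl';XMMMMMWNNXXXKOl.    ",
-- "     ;kKXXXNNWMMMMWk..:ccol,lo.:;::;:.cc,c,;cc:,c'cd,:dccc'.lNMMMMWNNXXXKOl.    ",
-- "     ;kKXXXNNWMMMMK,.::,co;.;:...,,,;,c;.c:;;;,.. ,c.'ll,;c'.xMMMMWNNXXXKOl.    ",
-- "     ;kKXXXNNWMMMMd.,' 'lo:''.   '..:ol. :dc'..   .,,;lo;..;.;XMMMWNNXXXKOl.    ",
-- "     ;kKXXXNNWMMMWc.;c,ox; ;o.  .oo.:o,...ll.,c   .dx..dx;;c.'0MMMWNNXXXKOl.    ",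
-- "     ;kKXXXNNWMMMWl.::.cxdc;lc'.,oc..:c'';l'.,oc'.;lc;oxo',c.,KMMMWNNXXXKOl.    ",
-- "     ;kKXXNNNWMMMMx.':,,;;coccc:c'.,:,cc,c;;:..:c:cllc;;,,:;.lWMMMWNNXXXK0l.    ",
-- "     ;kKXXXNNWMMMMNl.,c,.;oxko:::c;';;cl;c:;,,::::cxxdc..c:.;KMMMMWNNXXXK0l.    ",
-- "     ;kKXXXNNWMMMMMXl',:::c::::cld0O,.:olc..d0xlc::::cc::;':0MMMMMWNNXXXKOl.    ",
-- '     ;kKXXXNNWMMMMMMWx..col:,:lclkWWO:....,xNM0ocl:,:cll..lNMMMMMMWNNXXXKOl.    ',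
-- "     ;kKXXXNNWMMMMMMM0,;xl;;;;;:okXMMNo. ;XMMW0dc;;;;,cxc'xMMMMMMMWNNXXXKOl.    ",
-- "     ;kKXXXNNWMMMMMMWx..lc.;,'c:,,:colcclclol:;':l,';';o' cNMMMMMMWNNXXXKOl.    ",
-- "     ;OKXXXNNWMMMMMM0'':okclccc;';;.:x0NNXkl.,:';:cclcxdc'.dWMMMMMWNNXXXKOl.    ",
-- "     ;OKXXXNNWMMMMMK;.,,,ccccc,;'.:;'.,;,;..,c'.;,clccl;,,..kWMMMMWNNXXXK0l.    ",
-- "     ;kKXXXNNWMMMMNc.''';:cod'.cl..cl;:c,:;:l'.:l..ldcc:,''.,0MMMMWNNXXXX0l.    ",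
-- "     ;kKXXXNNWMMMMk.'oc::;:l;':o::::l::c,::cc:c:lc',c:;::co;.lWMMMWNNXXXK0l.    ",
-- "     ;kKXXXNNWMMMWc :ko:dk:.'c:;.:l;;;l;.cc,;cl.':c: 'xkccko.,KMMMWNNXXXKOl.    ",
-- "     ;OKXXXNNWMMMWc :l.,kd'.clcxcl:.;c:;,;cc.,lcdocl'.ckc.cl.'0MMMWNNXXXKOl.    ",
-- "     ;kKXXXNNWMMMMd';'.;;'''cc;d;c;.l,;ddc'l;'l;oc;l,'',;,.;'cNMMMWNNXXXK0l.    ",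
-- "     ;kKXXXNNWMMMMXl.'ko:;ccc:...:l.:c'',':c':l...,lcc:;lk:.;0MMMMWNNXXXK0l.    ",
-- "     ;kKXXXNNWWMMMMNo.;,;ccdoo,;d:''.:l;'cc'.';oc,codlc:,:':KMMMMMWNNXXXK0l.    ",
-- "     ,xKXXXNNWWWMMMMW0l..':oco,.';':dclc;clol',,..lllc,..:kNMMMMMWWNNXXXKOc.    ",
-- "     .lOKXXNNNNWWWMMMMWKxc;..,...::...cc,c,..;c.. ''.,:o0WMMMMWWWNNNNXXKKx'     ",
-- "      .lOKXXNNNNNNNNNNNNNNXOxl:;','....'......,',:cokKNNNNNNNNNNNNNNNXK0d'      ",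
-- '        ,dOKXXXXXNNNXXNNNNNNNNNNK0OkxdddddddxkOKXNNNNNNNNNNNNNNNNNXXK0x:.       ',
-- '         .,cdk00KKKKKKKKKKKKKKKKKKKKKKKKKKKKKKKKKKKKKKKKKKK000KKK0Oxl;.         ',
-- "             ..'''''''''''''''''''''''''''''''''''''''''''''''''''.             ",
-- '             Colorcat by Ben Gorlick (github: bgorlick) (c) 2024 | MIT     \n',
-- ]
--
-- _TARGET = re.compile(r"[kK0XNWMcdlxoO]")
--
-- def c_new_furball(input_text):
--     reps = [c for c in input_text if c.isalnum()]
--     if len(reps) < 10: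
--         return colorcat_furballs
--     n = len(reps)
--     k = 0
--     out = []
--     for line in colorcat_furballs[:-1]:
--         parts = _TARGET.split(line)
--         m = len(parts) - 1
--         fills = [reps[(k + j) % n] for j in range(m)] + [""]
--         k += m
--         out.append("".join(p + f for p, f in zip(parts, fills)))
--     out.append(colorcat_furballs[-1])
--     out.append("\n      Look carefully at the furball you just created... meow it contains your input :)")
--     return out
-- ===== Notes on version B (the rewrite author's own statement) =====
-- stated objective: idiomatic
-- what changed: Instead of walking each art line character by character with a stateful itertools.cycle, B splits each line on the 13-character target class (re.split), computes the cyclic replacement characters by modulo indexing from a running counter, and joins the pieces back with the fills interleaved.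
import Mathlib
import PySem

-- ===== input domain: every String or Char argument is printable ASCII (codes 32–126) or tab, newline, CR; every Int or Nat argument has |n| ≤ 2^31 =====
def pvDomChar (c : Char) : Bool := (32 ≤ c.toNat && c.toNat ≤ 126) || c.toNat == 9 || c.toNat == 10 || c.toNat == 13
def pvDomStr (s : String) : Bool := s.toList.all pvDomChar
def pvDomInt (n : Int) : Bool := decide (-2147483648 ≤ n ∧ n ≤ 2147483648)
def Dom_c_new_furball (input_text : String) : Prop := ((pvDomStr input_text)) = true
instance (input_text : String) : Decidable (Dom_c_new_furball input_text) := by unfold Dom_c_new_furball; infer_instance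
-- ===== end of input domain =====

-- B replaces the stateful per-character cycle with re.split on the target class plus
-- modulo-indexed fills interleaved back in (objective: idiomatic; no speed claim).

-- ===== PORT A =====
def ccTargets : List Char := ['k','K','0','X','N','W','M','c','d','l','x','o','O']

def ccFurballs : List String := [
  "            .';::::::::::::::::::::::::::::::::::::::::::::::::::;,..           ",
  "         .:dOKKKXXXXXXXXXXXXXXXXXXXXXXXXXXXXXXXXXXXXXXXXXXXXXXXXXKKOxc'         ",
  "       .ck0KXXNNNNNNXXNNNNNNNNNNNNNNNNNNNNNNNNNNNNNNNNNNNNXKNNNNNNNXXKOo'       ",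
  "      'd0KXXNNNNNWKc,;;cd0NWWWWWWWWWWWWWWWWWWWWWWWWWWWXkl;;;;kWNNNNNNXXKk;      ",
  "     .d0KXXNNNNWWWo.:x,.'.:kNMMMMMMMMMMMMMMMMMMMMMMWOl..''od.;XWWNNNNXXXKk,     ",
  "     ;kKXXXNNWWWMWc ;x;'l' .;xXMMMMMMMMMMMMMMMMMMWO:. .c;.do ,KMMWWNNXXXK0l.    ",
  "     ;kKXXXNNWMMMWc :x;';l:;;.;kWWX0OkkxxxkO0KNW0c.,;;cc',do.'0MMMWNNXXKK0l.    ",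
  "     ;kKXXXNNWMMMWl ,d;cl;;c:;,.,,.'........'.',..;:c:;cl;lc ;XMMMWNNXXXK0l.    ",
  "     ;kKXXXNNWMMMMk..l:';c'c;;c'c;.co;cc,c:lo.'l,::,c,;c';l,.lWMMMWNNXXXK0l.    ",
  "     ;kKXXXNNWMMMMNc ;d:.ccc;;c,x:'ldclc;clld,,x:::;ccl';dc.'0MMMMWNNXXXK0l.    ",
  "     ;kKXXXNNWMMMMM0,.locc'l,:c.;l';c.cl,c,:l'c:.;c'l;:llo'.xWMMMMWNNXXXK0l.    ",
  "     ;kKXXXNNWMMMMMWo.ccloc;.'::.:c;:.cc,c,;ccc.,c,.'colcl';XMMMMMWNNXXXKOl.    ",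
  "     ;kKXXXNNWMMMMWk..:ccol,lo.:;::;:.cc,c,;cc:,c'cd,:dccc'.lNMMMMWNNXXXKOl.    ",
  "     ;kKXXXNNWMMMMK,.::,co;.;:...,,,;,c;.c:;;;,.. ,c.'ll,;c'.xMMMMWNNXXXKOl.    ",
  "     ;kKXXXNNWMMMMd.,' 'lo:''.   '..:ol. :dc'..   .,,;lo;..;.;XMMMWNNXXXKOl.    ",
  "     ;kKXXXNNWMMMWc.;c,ox; ;o.  .oo.:o,...ll.,c   .dx..dx;;c.'0MMMWNNXXXKOl.    ",
  "     ;kKXXXNNWMMMWl.::.cxdc;lc'.,oc..:c'';l'.,oc'.;lc;oxo',c.,KMMMWNNXXXKOl.    ",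
  "     ;kKXXNNNWMMMMx.':,,;;coccc:c'.,:,cc,c;;:..:c:cllc;;,,:;.lWMMMWNNXXXK0l.    ",
  "     ;kKXXXNNWMMMMNl.,c,.;oxko:::c;';;cl;c:;,,::::cxxdc..c:.;KMMMMWNNXXXK0l.    ",
  "     ;kKXXXNNWMMMMMXl',:::c::::cld0O,.:olc..d0xlc::::cc::;':0MMMMMWNNXXXKOl.    ",
  "     ;kKXXXNNWMMMMMMWx..col:,:lclkWWO:....,xNM0ocl:,:cll..lNMMMMMMWNNXXXKOl.    ",
  "     ;kKXXXNNWMMMMMMM0,;xl;;;;;:okXMMNo. ;XMMW0dc;;;;,cxc'xMMMMMMMWNNXXXKOl.    ",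
  "     ;kKXXXNNWMMMMMMWx..lc.;,'c:,,:colcclclol:;':l,';';o' cNMMMMMMWNNXXXKOl.    ",
  "     ;OKXXXNNWMMMMMM0'':okclccc;';;.:x0NNXkl.,:';:cclcxdc'.dWMMMMMWNNXXXKOl.    ",
  "     ;OKXXXNNWMMMMMK;.,,,ccccc,;'.:;'.,;,;..,c'.;,clccl;,,..kWMMMMWNNXXXK0l.    ",
  "     ;kKXXXNNWMMMMNc.''';:cod'.cl..cl;:c,:;:l'.:l..ldcc:,''.,0MMMMWNNXXXX0l.    ",
  "     ;kKXXXNNWMMMMk.'oc::;:l;':o::::l::c,::cc:c:lc',c:;::co;.lWMMMWNNXXXK0l.    ",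
  "     ;kKXXXNNWMMMWc :ko:dk:.'c:;.:l;;;l;.cc,;cl.':c: 'xkccko.,KMMMWNNXXXKOl.    ",
  "     ;OKXXXNNWMMMWc :l.,kd'.clcxcl:.;c:;,;cc.,lcdocl'.ckc.cl.'0MMMWNNXXXKOl.    ",
  "     ;kKXXXNNWMMMMd';'.;;'''cc;d;c;.l,;ddc'l;'l;oc;l,'',;,.;'cNMMMWNNXXXK0l.    ",
  "     ;kKXXXNNWMMMMXl.'ko:;ccc:...:l.:c'',':c':l...,lcc:;lk:.;0MMMMWNNXXXK0l.    ",
  "     ;kKXXXNNWWMMMMNo.;,;ccdoo,;d:''.:l;'cc'.';oc,codlc:,:':KMMMMMWNNXXXK0l.    ",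
  "     ,xKXXXNNWWWMMMMW0l..':oco,.';':dclc;clol',,..lllc,..:kNMMMMMWWNNXXXKOc.    ",
  "     .lOKXXNNNNWWWMMMMWKxc;..,...::...cc,c,..;c.. ''.,:o0WMMMMWWWNNNNXXKKx'     ",
  "      .lOKXXNNNNNNNNNNNNNNXOxl:;','....'......,',:cokKNNNNNNNNNNNNNNNXK0d'      ",
  "        ,dOKXXXXXNNNXXNNNNNNNNNNK0OkxdddddddxkOKXNNNNNNNNNNNNNNNNNXXK0x:.       ",
  "         .,cdk00KKKKKKKKKKKKKKKKKKKKKKKKKKKKKKKKKKKKKKKKKKK000KKK0Oxl;.         ",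
  "             ..'''''''''''''''''''''''''''''''''''''''''''''''''''.             ",
  "             Colorcat by Ben Gorlick (github: bgorlick) (c) 2024 | MIT     \n"]

def ccMeow : String := "\n      Look carefully at the furball you just created... meow it contains your input :)"

-- itertools.cycle modelled as a rotating list: next = head, state rotates
def cycleNext : List Char → Char × List Char
  | [] => (' ', [])
  | c :: rest => (c, rest ++ [c])

-- the inner "for char in line" loop of A (builds the line front-to-back)
def procLineA : List Char → List Char → List Char × List Char
  | [], st => ([], st)
  | ch :: rest, st =>
    if ch ∈ ccTargets then
      let p := cycleNext st
      let q := procLineA rest p.2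
      (p.1 :: q.1, q.2)
    else
      let q := procLineA rest st
      (ch :: q.1, q.2)

def c_new_furball (input_text : String) : List String :=
  let rep_chars := input_text.toList.filter PySem.Chars.isalnum
  if rep_chars.length < 10 then ccFurballs
  else
    let r := ccFurballs.dropLast.foldl
      (fun (p : List String × List Char) line =>
        let q := procLineA line.toList p.2
        (p.1 ++ [String.mk q.1], q.2)) ([], rep_chars)
    r.1 ++ [ccFurballs.getLastD ""] ++ [ccMeow]

-- ===== PORT B =====
-- re.split(r"[kK0XNWMcdlxoO]", line): pieces between target characters
def splitTargets : List Char → List (List Char)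
  | [] => [[]]
  | c :: rest =>
    if c ∈ ccTargets then [] :: splitTargets rest
    else
      match splitTargets rest with
      | [] => [[c]]
      | p :: ps => (c :: p) :: ps

-- "".join(p + f for p, f in zip(parts, fills + [""]))
def weave : List (List Char) → List Char → List Char
  | [], _ => []
  | p :: _, [] => p
  | p :: ps, f :: fs => p ++ f :: weave ps fs

def c_new_furball_alt (input_text : String) : List String :=
  let reps := input_text.toList.filter PySem.Chars.isalnum
  if reps.length < 10 then ccFurballs
  else
    let n := reps.length
    let r := ccFurballs.dropLast.foldl
      (fun (p : List String × Nat) line =>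
        let parts := splitTargets line.toList
        let m := parts.length - 1
        let fills := (List.range m).map (fun j => reps.getD ((p.2 + j) % n) ' ')
        (p.1 ++ [String.mk (weave parts fills)], p.2 + m)) ([], 0)
    r.1 ++ [ccFurballs.getLastD ""] ++ [ccMeow]

-- ===== PRECONDITION & SPEC =====
def Spec_c_new_furball (input_text : String) (out : List String) : Prop := out = c_new_furball_alt input_text
instance (input_text : String) (out : List String) : Decidable (Spec_c_new_furball input_text out) := by unfold Spec_c_new_furball; infer_instance

-- ===== CLAIM (what is proved, stated in full; the proofs are below) =====
def Claim_equal_c_new_furball : Prop := ∀ (input_text : String), Dom_c_new_furball input_text → Spec_c_new_furball input_text (c_new_furball input_text)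

-- ===== LEMMAS AND PROOFS =====

-- state of A's cycle after k draws from reps
def ccRot (reps : List Char) (k : Nat) : List Char :=
  reps.drop (k % reps.length) ++ reps.take (k % reps.length)

def ccCnt (cs : List Char) : Nat := cs.countP (· ∈ ccTargets)

lemma ccRot_zero (reps : List Char) : ccRot reps 0 = reps := by
  simp [ccRot]

lemma cycleNext_rot (reps : List Char) (h : 2 ≤ reps.length) (k : Nat) :
    cycleNext (ccRot reps k) = (reps.getD (k % reps.length) ' ', ccRot reps (k + 1)) := by
  have hn : 0 < reps.length := by omega
  have hi : k % reps.length < reps.length := Nat.mod_lt _ hn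
  have hd : reps.drop (k % reps.length)
      = reps[k % reps.length] :: reps.drop (k % reps.length + 1) :=
    List.drop_eq_getElem_cons hi
  have htake : reps.take (k % reps.length) ++ [reps[k % reps.length]]
      = reps.take (k % reps.length + 1) := by
    rw [List.take_succ, List.getElem?_eq_getElem hi]
    rfl
  have hmod : (k + 1) % reps.length = (k % reps.length + 1) % reps.length := by
    rw [Nat.add_mod, Nat.mod_eq_of_lt (show 1 < reps.length by omega)]
  have hfst : reps.getD (k % reps.length) ' ' = reps[k % reps.length] :=
    List.getD_eq_getElem reps ' ' hi
  simp only [ccRot, hd, List.cons_append, cycleNext, hfst, Prod.mk.injEq]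
  refine ⟨trivial, ?_⟩
  rw [List.append_assoc, htake, hmod]
  by_cases hii : k % reps.length + 1 = reps.length
  · rw [hii, Nat.mod_self]
    simp
  · rw [Nat.mod_eq_of_lt (show k % reps.length + 1 < reps.length by omega)]

lemma splitTargets_ne_nil (cs : List Char) : splitTargets cs ≠ [] := by
  induction cs with
  | nil => simp [splitTargets]
  | cons c rest ih =>
    simp only [splitTargets]
    split
    · simp
    · cases h : splitTargets rest <;> simp

lemma splitTargets_length (cs : List Char) : (splitTargets cs).length = ccCnt cs + 1 := by
  induction cs with
  | nil => simp [splitTargets, ccCnt]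
  | cons c rest ih =>
    by_cases hc : c ∈ ccTargets
    · simp [splitTargets, hc, ccCnt] at *
      omega
    · cases h : splitTargets rest with
      | nil => exact absurd h (splitTargets_ne_nil rest)
      | cons p ps =>
        simp [splitTargets, hc, h, ccCnt] at *
        omega

def ccFills (reps : List Char) (k m : Nat) : List Char :=
  (List.range m).map (fun j => reps.getD ((k + j) % reps.length) ' ')

lemma ccFills_succ (reps : List Char) (k m : Nat) :
    ccFills reps k (m + 1) = reps.getD (k % reps.length) ' ' :: ccFills reps (k + 1) m := by
  simp only [ccFills, List.range_succ_eq_map, List.map_cons, List.map_map, Nat.add_zero]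
  congr 1
  apply List.map_congr_left
  intro j _
  simp only [Function.comp]
  congr 2
  omega

lemma weave_cons_cons (c : Char) (p : List Char) (ps : List (List Char)) (fs : List Char) :
    weave ((c :: p) :: ps) fs = c :: weave (p :: ps) fs := by
  cases fs <;> simp [weave]

lemma procLineA_eq (reps : List Char) (h : 2 ≤ reps.length) :
    ∀ (cs : List Char) (k : Nat),
      procLineA cs (ccRot reps k)
        = (weave (splitTargets cs) (ccFills reps k (ccCnt cs)), ccRot reps (k + ccCnt cs)) := by
  intro cs
  induction cs with
  | nil => intro k; simp [procLineA, splitTargets, ccCnt, ccFills, weave]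
  | cons c rest ih =>
    intro k
    by_cases hc : c ∈ ccTargets
    · have hcnt : ccCnt (c :: rest) = ccCnt rest + 1 := by
        simp [ccCnt, hc]
      simp only [procLineA, if_pos hc, cycleNext_rot reps h k, ih (k + 1), hcnt,
        splitTargets, ccFills_succ]
      have hk : k + 1 + ccCnt rest = k + (ccCnt rest + 1) := by omega
      simp [weave, hk]
    · have hcnt : ccCnt (c :: rest) = ccCnt rest := by
        simp [ccCnt, hc]
      cases hsp : splitTargets rest with
      | nil => exact absurd hsp (splitTargets_ne_nil rest)
      | cons p ps =>
        simp only [procLineA, if_neg hc, ih k, hcnt, splitTargets, hsp, weave_cons_cons]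

lemma fold_rel (reps : List Char) (h : 2 ≤ reps.length) :
    ∀ (lines : List String) (acc : List String) (k : Nat),
      lines.foldl
        (fun (p : List String × List Char) line =>
          let q := procLineA line.toList p.2
          (p.1 ++ [String.mk q.1], q.2)) (acc, ccRot reps k)
      = ((lines.foldl
            (fun (p : List String × Nat) line =>
              let parts := splitTargets line.toList
              let m := parts.length - 1
              let fills := (List.range m).map (fun j => reps.getD ((p.2 + j) % reps.length) ' ')
              (p.1 ++ [String.mk (weave parts fills)], p.2 + m)) (acc, k)).1,
          ccRot reps
            (lines.foldl
              (fun (p : List String × Nat) line =>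
                let parts := splitTargets line.toList
                let m := parts.length - 1
                let fills := (List.range m).map (fun j => reps.getD ((p.2 + j) % reps.length) ' ')
                (p.1 ++ [String.mk (weave parts fills)], p.2 + m)) (acc, k)).2) := by
  intro lines
  induction lines with
  | nil => intro acc k; simp
  | cons line rest ih =>
    intro acc k
    simp only [List.foldl_cons, procLineA_eq reps h, splitTargets_length,
      Nat.add_sub_cancel, ccFills]
    simp only [splitTargets_length, Nat.add_sub_cancel] at ih
    exact ih _ _

-- ===== VERDICT (by name: the statement is the Claim_ definition above) =====
theorem c_new_furball_spec : Claim_equal_c_new_furball := by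
  intro input_text _
  unfold Spec_c_new_furball c_new_furball c_new_furball_alt
  by_cases hg : (input_text.toList.filter PySem.Chars.isalnum).length < 10
  · simp [hg]
  · have h2 : 2 ≤ (input_text.toList.filter PySem.Chars.isalnum).length := by omega
    simp only [if_neg hg]
    have h0 := fold_rel (input_text.toList.filter PySem.Chars.isalnum) h2
      ccFurballs.dropLast [] 0
    rw [ccRot_zero] at h0
    simp only [h0]
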